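-- pv_equiv track=rewrite | github.com/noahturc/your-repo-name | Playground.py | snakefill
-- ===== SOURCE A (Python) =====
-- def snakefill(n):
--   x = n*n
--   snake = 1
--   i = 0
--   while snake <= x:
--     snake *= 2
--     i += 1
--   return i - 1
-- ===== SOURCE B (Python) =====
-- def snakefill(n):
--   return (n*n).bit_length() - 1
-- ===== Notes on version B (the rewrite author's own statement) =====
-- stated objective: simpler
-- what changed: Replaces the doubling while-loop with a direct bit_length query: floor(log2(n*n)) = (n*n).bit_length() - 1, including the -1 result at n = 0.
import Mathlib
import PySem

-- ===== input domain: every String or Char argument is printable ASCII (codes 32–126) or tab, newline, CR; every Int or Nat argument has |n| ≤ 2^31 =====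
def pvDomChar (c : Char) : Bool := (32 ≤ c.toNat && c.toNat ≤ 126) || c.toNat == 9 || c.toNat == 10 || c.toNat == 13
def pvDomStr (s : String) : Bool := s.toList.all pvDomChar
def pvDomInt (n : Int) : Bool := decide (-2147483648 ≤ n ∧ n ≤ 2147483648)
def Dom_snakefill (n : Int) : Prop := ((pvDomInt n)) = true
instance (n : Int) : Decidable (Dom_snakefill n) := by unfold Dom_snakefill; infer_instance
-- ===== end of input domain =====

-- B replaces A's doubling while-loop by the direct bit-length formula (n*n).bit_length() - 1 (objective: simpler).

-- ===== PORT A =====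
-- the while loop: 'while snake <= x: snake *= 2; i += 1'; the proof argument 1 ≤ snake
-- is a totality guard only (snake starts at 1 and only doubles)
def snakefillGo (x snake i : Int) (h : 1 ≤ snake) : Int :=
  if hc : snake ≤ x then snakefillGo x (snake * 2) (i + 1) (by omega) else i - 1
termination_by (x + 1 - snake).toNat
decreasing_by omega

def snakefill (n : Int) : Int :=
  let x := n * n
  snakefillGo x 1 0 (by omega)

-- ===== PORT B =====
def snakefill_alt (n : Int) : Int := (PySem.Int.bitLength (n * n) : Int) - 1

-- ===== PRECONDITION & SPEC =====
def Spec_snakefill (n : Int) (out : Int) : Prop := out = snakefill_alt n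
instance (n : Int) (out : Int) : Decidable (Spec_snakefill n out) := by unfold Spec_snakefill; infer_instance

-- ===== CLAIM (what is proved, stated in full; the proofs are below) =====
def Claim_equal_snakefill : Prop := ∀ (n : Int), Dom_snakefill n → Spec_snakefill n (snakefill n)

-- ===== LEMMAS AND PROOFS =====

-- for 0 ≤ x: 2^j ≤ x iff j < bitLength x
lemma pow_le_iff_lt_bitLength (x : Int) (hx : 0 ≤ x) (j : Nat) :
    ((2 : Int) ^ j ≤ x) ↔ j < PySem.Int.bitLength x := by
  constructor
  · intro hle
    by_contra hnot
    push_neg at hnot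
    have h1 : x.natAbs < 2 ^ PySem.Int.bitLength x := PySem.Int.lt_two_pow_bitLength x
    have h2 : (2 : Nat) ^ PySem.Int.bitLength x ≤ 2 ^ j := Nat.pow_le_pow_right (by norm_num) hnot
    have h3 : (2 : Int) ^ j ≤ x := hle
    have h4 : x.natAbs < 2 ^ j := lt_of_lt_of_le h1 h2
    have h5 : x < (((2 : Nat) ^ j : Nat) : Int) := by
      rw [← Int.natAbs_of_nonneg hx]; exact_mod_cast h4
    have h6 : (((2 : Nat) ^ j : Nat) : Int) = (2 : Int) ^ j := by push_cast; ring
    rw [h6] at h5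
    linarith
  · intro hlt
    have hne : x ≠ 0 := by
      intro h0; rw [h0] at hlt; simp [PySem.Int.bitLength_zero] at hlt
    have h2 : 2 ^ (PySem.Int.bitLength x - 1) ≤ x.natAbs := PySem.Int.two_pow_bitLength_le x hne
    have h3 : (2 : Nat) ^ j ≤ 2 ^ (PySem.Int.bitLength x - 1) :=
      Nat.pow_le_pow_right (by norm_num) (by omega)
    have h4 : (2 : Nat) ^ j ≤ x.natAbs := le_trans h3 h2
    have h5 : (((2 : Nat) ^ j : Nat) : Int) ≤ x := by
      rw [← Int.natAbs_of_nonneg hx]; exact_mod_cast h4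
    have h6 : (((2 : Nat) ^ j : Nat) : Int) = (2 : Int) ^ j := by push_cast; ring
    linarith [h6 ▸ h5]

lemma snakefillGo_eq (x : Int) (hx : 0 ≤ x) :
    ∀ (d j : Nat) (snake i : Int) (hs : snake = 2 ^ j) (hi : i = (j : Int))
      (h1 : 1 ≤ snake), PySem.Int.bitLength x ≤ j + d →
      snakefillGo x snake i h1 = (max j (PySem.Int.bitLength x) : Int) - 1 := by
  intro d
  induction d with
  | zero =>
    intro j snake i hs hi h1 hd
    have hble : PySem.Int.bitLength x ≤ j := by omega
    have hnc : ¬ snake ≤ x := by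
      rw [hs]; intro hc
      exact absurd ((pow_le_iff_lt_bitLength x hx j).mp hc) (by omega)
    rw [snakefillGo, dif_neg hnc]
    subst hi; omega
  | succ d ih =>
    intro j snake i hs hi h1 hd
    by_cases hc : snake ≤ x
    · have hjlt : j < PySem.Int.bitLength x :=
        (pow_le_iff_lt_bitLength x hx j).mp (hs ▸ hc)
      rw [snakefillGo, dif_pos hc]
      have := ih (j + 1) (snake * 2) (i + 1) (by rw [hs]; ring)
        (by push_cast; omega) (by omega) (by omega)
      rw [this]
      omega
    · have hble : PySem.Int.bitLength x ≤ j := by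
        by_contra hj
        exact hc (hs ▸ (pow_le_iff_lt_bitLength x hx j).mpr (by omega))
      rw [snakefillGo, dif_neg hc]
      subst hi; omega

-- ===== VERDICT (by name: the statement is the Claim_ definition above) =====
theorem snakefill_spec : Claim_equal_snakefill := by
  intro n _
  unfold Spec_snakefill snakefill snakefill_alt
  have hx : 0 ≤ n * n := mul_self_nonneg n
  have := snakefillGo_eq (n * n) hx (PySem.Int.bitLength (n * n)) 0 1 0
    (by norm_num) rfl (by norm_num) (by omega)
  simpa using this
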